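-- pv_equiv track=rewrite | github.com/Kha-Maker/45NSI | Sujet_22.py | liste_puissances
-- ===== SOURCE A (Python) =====
-- def liste_puissances(a: int, n: int) -> list:
--     assert n > 0, liste_puissances.__annotations__
--     l = []
--     r = 1
--     for i in range(n):
--         r *= a
--         l.append(r)
--     return l
-- ===== SOURCE B (Python) =====
-- def liste_puissances(a: int, n: int) -> list:
--     assert n > 0, liste_puissances.__annotations__
--     return [a**i for i in range(1, n + 1)]
-- ===== Notes on version B (the rewrite author's own statement) =====
-- stated objective: idiomatic
-- what changed: Replaces the running-product accumulator loop with appends by a single list comprehension computing each power a**i directly by exponentiation.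
import Mathlib
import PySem

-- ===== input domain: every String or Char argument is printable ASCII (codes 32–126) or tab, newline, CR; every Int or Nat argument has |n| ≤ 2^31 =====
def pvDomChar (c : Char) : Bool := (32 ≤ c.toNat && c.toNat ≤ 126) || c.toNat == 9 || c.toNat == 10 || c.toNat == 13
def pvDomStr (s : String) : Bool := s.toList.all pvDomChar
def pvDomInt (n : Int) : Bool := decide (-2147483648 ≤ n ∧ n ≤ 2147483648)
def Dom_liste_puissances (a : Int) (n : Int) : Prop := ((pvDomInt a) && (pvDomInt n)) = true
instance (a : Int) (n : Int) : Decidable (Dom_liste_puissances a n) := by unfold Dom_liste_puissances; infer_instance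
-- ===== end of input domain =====

-- B replaces A's running-product accumulator loop by a list comprehension of direct powers a**i (idiomatic; same integer results).
-- ===== PORT A =====
-- Python A: assert n > 0; l=[]; r=1; for i in range(n): r *= a; l.append(r); return l
def liste_puissances (a : Int) (n : Int) : List Int :=
  ((PySem.List.pyRange 0 n 1).foldl
    (fun (p : List Int × Int) _ => (p.1 ++ [p.2 * a], p.2 * a)) (([] : List Int), (1 : Int))).1

-- ===== PORT B =====
-- Python B: [a**i for i in range(1, n+1)]
def liste_puissances_alt (a : Int) (n : Int) : List Int :=
  (PySem.List.pyRange 1 (n + 1) 1).map (fun i => a ^ i.toNat)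

-- ===== PRECONDITION & SPEC =====
-- A's assert n > 0 raises AssertionError for n ≤ 0; Pre_ excludes exactly those inputs.
def Pre_liste_puissances (a : Int) (n : Int) : Prop := 0 < n
instance (a : Int) (n : Int) : Decidable (Pre_liste_puissances a n) := by unfold Pre_liste_puissances; infer_instance
def pvWitness_liste_puissances : Int × Int := (3, 4)

def Spec_liste_puissances (a : Int) (n : Int) (out : List Int) : Prop := out = liste_puissances_alt a n
instance (a : Int) (n : Int) (out : List Int) : Decidable (Spec_liste_puissances a n out) := by unfold Spec_liste_puissances; infer_instance

-- ===== CLAIM (what is proved, stated in full; the proofs are below) =====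
def Claim_equal_liste_puissances : Prop := ∀ (a : Int) (n : Int), Dom_liste_puissances a n → Pre_liste_puissances a n → Spec_liste_puissances a n (liste_puissances a n)

-- ===== LEMMAS AND PROOFS =====
-- Loop invariant of A's fold: starting from (l, r), after m more steps the pair is
-- (l ++ [r*a, r*a^2, …, r*a^m], r*a^m).
theorem lp_fold_range (a : Int) : ∀ (m : Nat) (l : List Int) (r : Int),
    (List.range m).foldl (fun (p : List Int × Int) (_ : Nat) => (p.1 ++ [p.2 * a], p.2 * a)) (l, r)
      = (l ++ (List.range m).map (fun k => r * a ^ (k + 1)), r * a ^ m) := by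
  intro m
  induction m with
  | zero => intro l r; simp
  | succ m ih =>
      intro l r
      rw [List.range_succ, List.foldl_append, ih]
      simp [List.range_succ, pow_succ, mul_assoc]

theorem liste_puissances_spec : Claim_equal_liste_puissances := by
  intro a n _ hn
  unfold Spec_liste_puissances liste_puissances liste_puissances_alt
  rw [PySem.List.pyRange_one 0 n, PySem.List.pyRange_one 1 (n + 1)]
  have h1 : n - 0 = n := by ring
  have h2 : n + 1 - 1 = n := by ring
  rw [h1, h2, List.foldl_map, lp_fold_range]
  simp only [List.nil_append, List.map_map]
  apply List.map_congr_left
  intro k _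
  show (1 : Int) * a ^ (k + 1) = a ^ ((1 : Int) + (k : Int)).toNat
  have : ((1 : Int) + (k : Int)).toNat = k + 1 := by omega
  rw [this, one_mul]

-- ===== VERDICT (by name: the statement is the Claim_ definition above) =====
-- (proved above)
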